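-- pv_equiv track=rewrite | github.com/climr-ai/ccvault | src/dnd_manager/data/weapon_mastery.py | get_weapon_mastery_limit_for_class
-- ===== SOURCE A (Python) =====
-- WEAPON_MASTERY_PROGRESSIONS = {
--     # class_name: list of (level_threshold, mastery_count)
--     "Barbarian": [(1, 2), (4, 3), (10, 4)],
--     "Fighter": [(1, 3), (4, 4), (10, 5), (16, 6)],
--     "Paladin": [(1, 2)],
--     "Ranger": [(1, 2)],
--     "Rogue": [(1, 2)],
-- }
--
-- def get_weapon_mastery_limit_for_class(class_name: str, level: int) -> int:
--     progression = WEAPON_MASTERY_PROGRESSIONS.get(class_name)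
--     if not progression:
--         return 0
--     limit = 0
--     for threshold, count in progression:
--         if level >= threshold:
--             limit = count
--     return limit
-- ===== SOURCE B (Python) =====
-- WEAPON_MASTERY_PROGRESSIONS = {
--     "Barbarian": [(1, 2), (4, 3), (10, 4)],
--     "Fighter": [(1, 3), (4, 4), (10, 5), (16, 6)],
--     "Paladin": [(1, 2)],
--     "Ranger": [(1, 2)],
--     "Rogue": [(1, 2)],
-- }
--
-- def get_weapon_mastery_limit_for_class(class_name: str, level: int) -> int:
--     progression = WEAPON_MASTERY_PROGRESSIONS.get(class_name, [])
--     # binary search: lo ends as the number of thresholds <= level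
--     lo, hi = 0, len(progression)
--     while lo < hi:
--         mid = (lo + hi) // 2
--         if progression[mid][0] <= level:
--             lo = mid + 1
--         else:
--             hi = mid
--     return progression[lo - 1][1] if lo > 0 else 0
-- ===== Notes on version B (the rewrite author's own statement) =====
-- stated objective: alternative
-- what changed: Replaces A's linear scan with accumulator over the whole progression by a hand-rolled bisect_right binary search on the ascending thresholds, indexing the last entry whose threshold is <= level (0 if none or unknown class).
import Mathlib
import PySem

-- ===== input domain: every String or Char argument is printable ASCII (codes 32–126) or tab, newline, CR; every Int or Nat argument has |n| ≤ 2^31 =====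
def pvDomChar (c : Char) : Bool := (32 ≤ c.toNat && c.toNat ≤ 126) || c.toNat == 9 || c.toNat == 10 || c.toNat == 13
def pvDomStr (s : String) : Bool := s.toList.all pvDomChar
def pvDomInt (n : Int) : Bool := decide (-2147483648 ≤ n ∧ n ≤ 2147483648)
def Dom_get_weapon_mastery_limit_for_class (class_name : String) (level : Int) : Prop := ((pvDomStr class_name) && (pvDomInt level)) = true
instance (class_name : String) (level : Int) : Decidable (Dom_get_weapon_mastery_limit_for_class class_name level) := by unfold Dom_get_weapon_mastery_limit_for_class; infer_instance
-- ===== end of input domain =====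

-- B replaces A's linear accumulator scan of the progression by a binary search (bisect_right)
-- over the ascending thresholds; same return value, objective: alternative structure.

-- ===== PORT A =====
def WEAPON_MASTERY_PROGRESSIONS : PySem.Dict String (List (Int × Int)) :=
  PySem.Dict.ofList
    [ ("Barbarian", [(1, 2), (4, 3), (10, 4)])
    , ("Fighter",   [(1, 3), (4, 4), (10, 5), (16, 6)])
    , ("Paladin",   [(1, 2)])
    , ("Ranger",    [(1, 2)])
    , ("Rogue",     [(1, 2)]) ]

def get_weapon_mastery_limit_for_class (class_name : String) (level : Int) : Int :=
  match WEAPON_MASTERY_PROGRESSIONS.get? class_name with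
  | none => 0            -- progression is None → falsy → return 0
  | some progression =>
    if progression.isEmpty then 0   -- empty list is falsy too
    else progression.foldl (fun limit tc => if level ≥ tc.1 then tc.2 else limit) 0

-- ===== PORT B =====
-- hand-rolled bisect_right loop from Source B: lo ends as the number of thresholds ≤ level
def pvBisect (xs : List (Int × Int)) (level : Int) (lo hi : Nat) : Nat :=
  if lo < hi then
    let mid := (lo + hi) / 2
    if (xs.getD mid (0, 0)).1 ≤ level then pvBisect xs level (mid + 1) hi
    else pvBisect xs level lo mid
  else lo
termination_by hi - lo
decreasing_by all_goals omega

def get_weapon_mastery_limit_for_class_alt (class_name : String) (level : Int) : Int :=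
  let progression := (WEAPON_MASTERY_PROGRESSIONS.get? class_name).getD []
  let lo := pvBisect progression level 0 progression.length
  if lo > 0 then (progression.getD (lo - 1) (0, 0)).2 else 0

-- ===== PRECONDITION & SPEC =====
def Spec_get_weapon_mastery_limit_for_class (class_name : String) (level : Int) (out : Int) : Prop := out = get_weapon_mastery_limit_for_class_alt class_name level
instance (class_name : String) (level : Int) (out : Int) : Decidable (Spec_get_weapon_mastery_limit_for_class class_name level out) := by unfold Spec_get_weapon_mastery_limit_for_class; infer_instance

-- ===== CLAIM (what is proved, stated in full; the proofs are below) =====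
def Claim_equal_get_weapon_mastery_limit_for_class : Prop := ∀ (class_name : String) (level : Int), Dom_get_weapon_mastery_limit_for_class class_name level → Spec_get_weapon_mastery_limit_for_class class_name level (get_weapon_mastery_limit_for_class class_name level)

-- ===== LEMMAS AND PROOFS =====

-- ===== VERDICT (by name: the statement is the Claim_ definition above) =====
theorem get_weapon_mastery_limit_for_class_spec : Claim_equal_get_weapon_mastery_limit_for_class := by
  intro class_name level _
  unfold Spec_get_weapon_mastery_limit_for_class
  unfold get_weapon_mastery_limit_for_class get_weapon_mastery_limit_for_class_alt
  by_cases h1 : class_name = "Barbarian"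
  · subst h1
    have hg : WEAPON_MASTERY_PROGRESSIONS.get? "Barbarian"
        = some [((1:Int), (2:Int)), (4, 3), (10, 4)] := by decide
    rw [hg]
    by_cases a1 : (1:Int) ≤ level <;> by_cases a2 : (4:Int) ≤ level <;> by_cases a3 : (10:Int) ≤ level <;>
      simp [pvBisect, a1, a2, a3, List.getD] <;> omega
  by_cases h2 : class_name = "Fighter"
  · subst h2
    have hg : WEAPON_MASTERY_PROGRESSIONS.get? "Fighter"
        = some [((1:Int), (3:Int)), (4, 4), (10, 5), (16, 6)] := by decide
    rw [hg]
    by_cases a1 : (1:Int) ≤ level <;> by_cases a2 : (4:Int) ≤ level <;> by_cases a3 : (10:Int) ≤ level <;>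
      by_cases a4 : (16:Int) ≤ level <;> simp [pvBisect, a1, a2, a3, a4, List.getD] <;> omega
  by_cases h3 : class_name = "Paladin"
  · subst h3
    have hg : WEAPON_MASTERY_PROGRESSIONS.get? "Paladin" = some [((1:Int), (2:Int))] := by decide
    rw [hg]
    by_cases a1 : (1:Int) ≤ level <;> simp [pvBisect, a1, List.getD]
  by_cases h4 : class_name = "Ranger"
  · subst h4
    have hg : WEAPON_MASTERY_PROGRESSIONS.get? "Ranger" = some [((1:Int), (2:Int))] := by decide
    rw [hg]
    by_cases a1 : (1:Int) ≤ level <;> simp [pvBisect, a1, List.getD]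
  by_cases h5 : class_name = "Rogue"
  · subst h5
    have hg : WEAPON_MASTERY_PROGRESSIONS.get? "Rogue" = some [((1:Int), (2:Int))] := by decide
    rw [hg]
    by_cases a1 : (1:Int) ≤ level <;> simp [pvBisect, a1, List.getD]
  · have hW : WEAPON_MASTERY_PROGRESSIONS = PySem.Dict.mk
        [ ("Barbarian", [((1:Int), (2:Int)), (4, 3), (10, 4)])
        , ("Fighter",   [(1, 3), (4, 4), (10, 5), (16, 6)])
        , ("Paladin",   [(1, 2)])
        , ("Ranger",    [(1, 2)])
        , ("Rogue",     [(1, 2)]) ] := by decide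
    have hg : WEAPON_MASTERY_PROGRESSIONS.get? class_name = none := by
      simp [hW, PySem.Dict.get?, beq_iff_eq,
        Ne.symm h1, Ne.symm h2, Ne.symm h3, Ne.symm h4, Ne.symm h5]
    rw [hg]
    simp [pvBisect]
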